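-- pv_equiv track=rewrite | github.com/Himan-D/open-agent-sdk | src/smith_ai/agi/__init__.py | _find_common_pattern
-- ===== SOURCE A (Python) =====
-- from typing import Any, Callable, Dict, List, Optional, Set, Tuple, Type
--
-- def _find_common_pattern(items: List[str]) -> Optional[str]:
--     """Find common pattern in items."""
--     if not items:
--         return None
--
--     words = items[0].lower().split()
--     for word in words:
--         if all(word in item.lower() for item in items):
--             return word
--
--     return items[0][:20] if items else None
-- ===== SOURCE B (Python) =====
-- def _find_common_pattern(items):
--     """Find common pattern in items."""
--     if not items:
--         return None
--     # shrinking candidate set: prune by each item in turn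
--     candidates = items[0].lower().split()
--     for item in items:
--         low = item.lower()
--         candidates = [w for w in candidates if w in low]
--     return candidates[0] if candidates else items[0][:20]
-- ===== Notes on version B (the rewrite author's own statement) =====
-- stated objective: alternative
-- what changed: Inverts the loop nesting: instead of testing each word of items[0] against all items with all(), B iterates over the items once, maintaining and pruning a shrinking candidate word list, and returns the first survivor.
import Mathlib
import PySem

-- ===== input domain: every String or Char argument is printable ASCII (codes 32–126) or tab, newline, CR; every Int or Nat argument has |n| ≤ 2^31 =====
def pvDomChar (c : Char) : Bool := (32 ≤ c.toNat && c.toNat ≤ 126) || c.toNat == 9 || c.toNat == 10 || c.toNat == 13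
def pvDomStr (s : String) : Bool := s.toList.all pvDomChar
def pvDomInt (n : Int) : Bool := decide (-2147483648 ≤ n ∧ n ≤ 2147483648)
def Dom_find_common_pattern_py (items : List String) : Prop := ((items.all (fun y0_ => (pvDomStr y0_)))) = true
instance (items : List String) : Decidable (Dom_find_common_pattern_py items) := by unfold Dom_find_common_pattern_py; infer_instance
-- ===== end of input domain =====

-- B inverts the loop nesting: it prunes a shrinking candidate word list per item instead of testing each word of items[0] against all items (alternative decomposition, same result).


-- ===== PORT A =====
-- A's 'for word in words: if all(word in item.lower() for item in items): return word'
def fcpWordLoop (items : List String) : List String → Option String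
  | [] => none
  | w :: rest =>
    if items.all (fun it => PySem.Str.isIn w (PySem.Str.lower it)) then some w
    else fcpWordLoop items rest

def find_common_pattern_py (items : List String) : Option String :=
  if items.isEmpty then none
  else
    let words := PySem.Str.split₀ (PySem.Str.lower (items.headD ""))
    match fcpWordLoop items words with
    | some w => some w
    | none =>
      -- 'items[0][:20] if items else None'
      if !items.isEmpty then some (PySem.Str.slice (items.headD "") none (some 20)) else none

-- ===== PORT B =====
def find_common_pattern_py_alt (items : List String) : Option String :=
  if items.isEmpty then none
  else
    let cands :=
      items.foldl
        (fun cs it =>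
          let low := PySem.Str.lower it
          cs.filter (fun w => PySem.Str.isIn w low))
        (PySem.Str.split₀ (PySem.Str.lower (items.headD "")))
    match cands with
    | w :: _ => some w
    | [] => some (PySem.Str.slice (items.headD "") none (some 20))

-- ===== PRECONDITION & SPEC =====
def Spec_find_common_pattern_py (items : List String) (out : Option String) : Prop := out = find_common_pattern_py_alt items
instance (items : List String) (out : Option String) : Decidable (Spec_find_common_pattern_py items out) := by unfold Spec_find_common_pattern_py; infer_instance

-- ===== CLAIM (what is proved, stated in full; the proofs are below) =====
def Claim_equal_find_common_pattern_py : Prop := ∀ (items : List String), Dom_find_common_pattern_py items → Spec_find_common_pattern_py items (find_common_pattern_py items)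

-- ===== LEMMAS AND PROOFS =====

-- A's word loop returns the head of the filtered word list
theorem fcpWordLoop_eq_head? (items : List String) (ws : List String) :
    fcpWordLoop items ws
      = (ws.filter (fun w => items.all (fun it => PySem.Str.isIn w (PySem.Str.lower it)))).head? := by
  induction ws with
  | nil => rfl
  | cons w rest ih =>
    by_cases h : (items.all fun it => PySem.Str.isIn w (PySem.Str.lower it)) = true
    · rw [fcpWordLoop, if_pos h, List.filter_cons, if_pos h]; rfl
    · rw [fcpWordLoop, if_neg h, List.filter_cons, if_neg h, ih]

-- B's fold of per-item filters is one filter by the conjunction over all items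
theorem foldl_filter_eq_filter_all (items : List String) (ws : List String) :
    items.foldl
        (fun cs it =>
          let low := PySem.Str.lower it
          cs.filter (fun w => PySem.Str.isIn w low)) ws
      = ws.filter (fun w => items.all (fun it => PySem.Str.isIn w (PySem.Str.lower it))) := by
  induction items generalizing ws with
  | nil => simp
  | cons it rest ih =>
    simp only [List.foldl_cons]
    rw [ih, List.filter_filter]
    congr 1
    funext w
    simp [List.all_cons, Bool.and_comm]

-- ===== VERDICT (by name: the statement is the Claim_ definition above) =====
theorem find_common_pattern_py_spec : Claim_equal_find_common_pattern_py := by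
  intro items _
  unfold Spec_find_common_pattern_py find_common_pattern_py find_common_pattern_py_alt
  by_cases h : items.isEmpty
  · simp [h]
  · simp only [h, if_false, Bool.false_eq_true, Bool.not_false]
    rw [fcpWordLoop_eq_head?, foldl_filter_eq_filter_all]
    cases (PySem.Str.split₀ (PySem.Str.lower (items.headD ""))).filter
        (fun w => items.all fun it => PySem.Str.isIn w (PySem.Str.lower it)) with
    | nil => simp
    | cons w rest => simp
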